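-- pv_equiv track=rewrite | github.com/Calmingstorm/heimdall | src/packaging/validate.py | validate_nfpm_contents_consistency
-- ===== SOURCE A (Python) =====
-- from typing import Any
--
-- def validate_nfpm_contents_consistency(config: dict[str, Any]) -> list[str]:
--     """Validate that nfpm contents are consistent with FHS layout.
--
--     Checks that the package installs to the expected directories
--     and includes the systemd service file.
--     """
--     errors: list[str] = []
--
--     contents = config.get("contents", [])
--     destinations = {
--         entry["dst"]
--         for entry in contents
--         if isinstance(entry, dict) and "dst" in entry
--     }
--
--     # Service file must go to systemd directory
--     systemd_dsts = [d for d in destinations if "systemd" in d and d.endswith(".service")]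
--     if not systemd_dsts:
--         errors.append("No systemd service file in contents")
--
--     # Application code must go under /opt/heimdall/
--     app_dsts = [d for d in destinations if d.startswith("/opt/heimdall/")]
--     if not app_dsts:
--         errors.append("No application files under /opt/heimdall/")
--
--     # Check that source code directory is included
--     if not any(d.startswith("/opt/heimdall/src") for d in destinations):
--         errors.append("Source code directory /opt/heimdall/src/ not in contents")
--
--     return errors
-- ===== SOURCE B (Python) =====
-- def validate_nfpm_contents_consistency(config):
--     """Worklist algorithm: keep a table of pending (predicate, message) checks,
--     discharge checks as entries satisfy them, stop as soon as none remain;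
--     the survivors' messages (in table order) are the errors."""
--     pending = [
--         (lambda d: "systemd" in d and d.endswith(".service"),
--          "No systemd service file in contents"),
--         (lambda d: d.startswith("/opt/heimdall/"),
--          "No application files under /opt/heimdall/"),
--         (lambda d: d.startswith("/opt/heimdall/src"),
--          "Source code directory /opt/heimdall/src/ not in contents"),
--     ]
--     for entry in config.get("contents", []):
--         if not pending:
--             break
--         if isinstance(entry, dict) and "dst" in entry:
--             d = entry["dst"]
--             pending = [c for c in pending if not c[0](d)]
--     return [msg for _, msg in pending]
-- ===== Notes on version B (the rewrite author's own statement) =====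
-- stated objective: alternative
-- what changed: Replaces A's destination-set construction plus three separate scans with a data-driven worklist: a table of pending (predicate, message) checks pruned while walking contents once, with early exit when the worklist empties; the surviving messages are the errors.
import Mathlib
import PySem

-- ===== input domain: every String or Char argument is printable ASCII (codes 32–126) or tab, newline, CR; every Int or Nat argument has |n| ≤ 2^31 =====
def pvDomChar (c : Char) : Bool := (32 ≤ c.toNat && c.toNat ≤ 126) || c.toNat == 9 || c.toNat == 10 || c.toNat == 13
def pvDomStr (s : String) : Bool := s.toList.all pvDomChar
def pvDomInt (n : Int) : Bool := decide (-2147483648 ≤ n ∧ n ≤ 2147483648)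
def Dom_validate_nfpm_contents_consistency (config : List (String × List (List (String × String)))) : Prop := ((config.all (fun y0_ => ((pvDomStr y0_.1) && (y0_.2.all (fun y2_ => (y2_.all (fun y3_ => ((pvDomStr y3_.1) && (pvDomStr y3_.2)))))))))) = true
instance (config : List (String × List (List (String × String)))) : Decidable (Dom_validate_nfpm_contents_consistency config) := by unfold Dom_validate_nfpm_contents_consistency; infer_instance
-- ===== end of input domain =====

-- B replaces A's destination set + three scans with a worklist of pending (predicate, message) checks pruned in one walk over contents with early exit (objective: alternative).


-- ===== PORT A =====
-- A: build the set of 'dst' values, then scan it three times (two filter comprehensions, one any).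
def validate_nfpm_contents_consistency (config : List (String × List (List (String × String)))) : List String :=
  let errors : List String := []
  let contents := (PySem.Dict.get? (PySem.Dict.mk config) "contents").getD []
  let destinations : PySem.Set String :=
    PySem.Set.ofList (contents.filterMap (fun entry => PySem.Dict.get? (PySem.Dict.mk entry) "dst"))
  let systemd_dsts := destinations.filter
    (fun d => PySem.Str.isIn "systemd" d && PySem.Str.endswith d ".service")
  let errors := if systemd_dsts = [] then errors ++ ["No systemd service file in contents"] else errors
  let app_dsts := destinations.filter (fun d => PySem.Str.startswith d "/opt/heimdall/")
  let errors := if app_dsts = [] then errors ++ ["No application files under /opt/heimdall/"] else errors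
  let errors := if ¬ (destinations.any (fun d => PySem.Str.startswith d "/opt/heimdall/src"))
    then errors ++ ["Source code directory /opt/heimdall/src/ not in contents"] else errors
  errors

-- ===== PORT B =====
-- B: worklist of pending (predicate, message) checks, pruned entry by entry, early exit when empty.
def pvChecks : List ((String → Bool) × String) :=
  [ (fun d => PySem.Str.isIn "systemd" d && PySem.Str.endswith d ".service",
     "No systemd service file in contents"),
    (fun d => PySem.Str.startswith d "/opt/heimdall/",
     "No application files under /opt/heimdall/"),
    (fun d => PySem.Str.startswith d "/opt/heimdall/src",
     "Source code directory /opt/heimdall/src/ not in contents") ]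

-- the loop: 'if not pending: break' is the first match arm
def pvPrune : List (List (String × String)) → List ((String → Bool) × String) → List String
  | _, [] => []
  | [], pending => pending.map Prod.snd
  | entry :: rest, pending =>
    match PySem.Dict.get? (PySem.Dict.mk entry) "dst" with
    | some d => pvPrune rest (pending.filter (fun c => !(c.1 d)))
    | none => pvPrune rest pending

def validate_nfpm_contents_consistency_alt (config : List (String × List (List (String × String)))) : List String :=
  pvPrune ((PySem.Dict.get? (PySem.Dict.mk config) "contents").getD []) pvChecks

-- ===== PRECONDITION & SPEC =====
def Spec_validate_nfpm_contents_consistency (config : List (String × List (List (String × String)))) (out : List String) : Prop := out = validate_nfpm_contents_consistency_alt config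
instance (config : List (String × List (List (String × String)))) (out : List String) : Decidable (Spec_validate_nfpm_contents_consistency config out) := by unfold Spec_validate_nfpm_contents_consistency; infer_instance

-- ===== CLAIM (what is proved, stated in full; the proofs are below) =====
def Claim_equal_validate_nfpm_contents_consistency : Prop := ∀ (config : List (String × List (List (String × String)))), Dom_validate_nfpm_contents_consistency config → Spec_validate_nfpm_contents_consistency config (validate_nfpm_contents_consistency config)

-- ===== LEMMAS AND PROOFS =====

-- pvPrune keeps exactly the checks no extracted 'dst' satisfies, and returns their messages in order
theorem pvPrune_eq (contents : List (List (String × String))) (pending : List ((String → Bool) × String)) :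
    pvPrune contents pending
    = (pending.filter (fun c =>
        !((contents.filterMap (fun entry => PySem.Dict.get? (PySem.Dict.mk entry) "dst")).any c.1))).map Prod.snd := by
  induction contents generalizing pending with
  | nil =>
    cases pending with
    | nil => simp [pvPrune]
    | cons c t => simp [pvPrune]
  | cons e rest ih =>
    cases pending with
    | nil => simp [pvPrune]
    | cons c t =>
      cases h : PySem.Dict.get? (PySem.Dict.mk e) "dst" with
      | none =>
        simp only [pvPrune, h, List.filterMap_cons]
        exact ih (c :: t)
      | some d =>
        simp only [pvPrune, h, List.filterMap_cons, ih, List.filter_filter, List.any_cons]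
        congr 1
        apply List.filter_congr
        intro x _
        cases h1 : x.1 d <;> simp

-- a filter over set(xs) is empty iff no element of xs satisfies the predicate
theorem pvFilterOfListEmpty (xs : List String) (p : String → Bool) :
    ((PySem.Set.ofList xs).filter p = []) ↔ (xs.any p = false) := by
  rw [List.filter_eq_nil_iff, List.any_eq_false]
  constructor
  · intro h x hx; exact h x ((PySem.Set.mem_ofList xs x).mpr hx)
  · intro h x hx; exact h x ((PySem.Set.mem_ofList xs x).mp hx)

-- any over set(xs) equals any over xs
theorem pvAnyOfList (xs : List String) (p : String → Bool) :
    (PySem.Set.ofList xs).any p = xs.any p := by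
  cases h : xs.any p with
  | true =>
    rw [List.any_eq_true] at h ⊢
    obtain ⟨x, hx, hp⟩ := h
    exact ⟨x, (PySem.Set.mem_ofList xs x).mpr hx, hp⟩
  | false =>
    rw [List.any_eq_false] at h ⊢
    intro x hx; exact h x ((PySem.Set.mem_ofList xs x).mp hx)

-- ===== VERDICT (by name: the statement is the Claim_ definition above) =====
theorem validate_nfpm_contents_consistency_spec : Claim_equal_validate_nfpm_contents_consistency := by
  intro config _
  unfold Spec_validate_nfpm_contents_consistency
  unfold validate_nfpm_contents_consistency validate_nfpm_contents_consistency_alt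
  rw [pvPrune_eq]
  simp only [pvChecks, List.filter_cons, List.filter_nil, pvFilterOfListEmpty, pvAnyOfList]
  generalize (((PySem.Dict.get? (PySem.Dict.mk config) "contents").getD []).filterMap
      (fun entry => PySem.Dict.get? (PySem.Dict.mk entry) "dst")) = ds
  cases h1 : ds.any (fun d => PySem.Str.isIn "systemd" d && PySem.Str.endswith d ".service") <;>
  cases h2 : ds.any (fun d => PySem.Str.startswith d "/opt/heimdall/") <;>
  cases h3 : ds.any (fun d => PySem.Str.startswith d "/opt/heimdall/src") <;>
    simp [h1, h2, h3]
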